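-- pv_equiv track=rewrite | github.com/meiheW/Servo-Assembly | Application/FindGear/监测-python/ImageProc.py | getmeanHight2
-- ===== SOURCE A (Python) =====
-- def getmeanHight2(l):
--     maxv=max(l)
--     minv=min(l)
--
--     xx=[0 for x in range(0, maxv-minv+1)]
--     for i in range(0,maxv-minv):
--         for v in l[:]:
--             if abs(i+minv-v)<2:
--                 xx[i]=xx[i]+1
--
--     return xx.index(max(xx))+minv
-- ===== SOURCE B (Python) =====
-- def getmeanHight2(l):
--     minv = min(l)
--     maxv = max(l)
--     R = maxv - minv
--     if R == 0:
--         return minv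
--     cnt = {}
--     for v in l:
--         cnt[v] = cnt.get(v, 0) + 1
--     cands = sorted({i for v in cnt for i in (v - minv - 1, v - minv, v - minv + 1) if 0 <= i < R})
--     best_i = 0
--     best_c = 0
--     for i in cands:
--         c = cnt.get(minv + i - 1, 0) + cnt.get(minv + i, 0) + cnt.get(minv + i + 1, 0)
--         if c > best_c:
--             best_i = i
--             best_c = c
--     return best_i + minv
-- ===== Notes on version B (the rewrite author's own statement) =====
-- stated objective: faster
-- what changed: A rescans the whole list for every offset in [min,max) (and linearly rescans the table for its max); B builds a value counter once and takes the first strict improvement over the sorted candidate offsets adjacent to actual values, so the O(range) outer loop over all offsets disappears.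
import Mathlib
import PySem

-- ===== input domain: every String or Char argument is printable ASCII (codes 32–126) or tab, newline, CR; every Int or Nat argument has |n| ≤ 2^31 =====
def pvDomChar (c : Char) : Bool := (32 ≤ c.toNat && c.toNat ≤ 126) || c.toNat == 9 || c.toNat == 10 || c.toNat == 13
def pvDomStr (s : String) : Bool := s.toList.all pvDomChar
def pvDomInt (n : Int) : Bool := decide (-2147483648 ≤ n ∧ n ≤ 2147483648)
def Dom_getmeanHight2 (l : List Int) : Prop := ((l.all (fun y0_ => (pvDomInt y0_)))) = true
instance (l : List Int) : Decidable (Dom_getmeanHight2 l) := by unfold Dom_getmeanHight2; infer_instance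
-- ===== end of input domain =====

-- B replaces A's scan of the whole list for every offset in [min,max) (O(range·n)) by a value
-- counter built once and a single pass over the sorted candidate offsets near actual values
-- (O(n log n)); objective: faster (asymptotic).

-- ===== PORT A =====
def getmeanHight2 (l : List Int) : Int :=
  match PySem.List.max? l (fun x => x), PySem.List.min? l (fun x => x) with
  | some maxv, some minv =>
    let xx : List Int := (PySem.List.pyRange 0 (maxv - minv + 1)).map (fun _ => 0)
    let xx := (PySem.List.pyRange 0 (maxv - minv)).foldl (fun xx i =>
      l.foldl (fun xx v =>
        if |i + minv - v| < 2 then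
          PySem.List.pySetD xx i (PySem.List.pyGetD xx i 0 + 1)
        else xx) xx) xx
    match PySem.List.max? xx (fun x => x) with
    | some m =>
      match PySem.List.index? xx m with
      | some idx => (idx : Int) + minv
      | none => 0
    | none => 0
  | _, _ => 0

-- ===== PORT B =====
def getmeanHight2_alt (l : List Int) : Int :=
  match PySem.List.min? l (fun x => x) with
  | none => 0
  | some minv =>
    match PySem.List.max? l (fun x => x) with
    | none => 0
    | some maxv =>
    let R := maxv - minv
    if R = 0 then minv
    else
      let cnt := l.foldl (fun d v => d.insert v (d.getD v 0 + 1)) (PySem.Dict.empty : PySem.Dict Int Int)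
      let cands := PySem.List.sorted
        (PySem.Set.ofList ((PySem.Dict.keys cnt).flatMap (fun v =>
          [v - minv - 1, v - minv, v - minv + 1].filter (fun i => decide (0 ≤ i ∧ i < R)))))
        (fun x => x)
      let best := cands.foldl (fun (b : Int × Int) i =>
        let c := cnt.getD (minv + i - 1) 0 + cnt.getD (minv + i) 0 + cnt.getD (minv + i + 1) 0
        if b.2 < c then (i, c) else b) (0, 0)
      best.1 + minv

-- ===== PRECONDITION & SPEC =====
-- Python A raises ValueError (max of empty sequence) on the empty list; B raises there too.
def Pre_getmeanHight2 (l : List Int) : Prop := l ≠ []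
instance (l : List Int) : Decidable (Pre_getmeanHight2 l) := by unfold Pre_getmeanHight2; infer_instance
def pvWitness_getmeanHight2 : List Int := [1, 2, 5]
def Spec_getmeanHight2 (l : List Int) (out : Int) : Prop := out = getmeanHight2_alt l
instance (l : List Int) (out : Int) : Decidable (Spec_getmeanHight2 l out) := by unfold Spec_getmeanHight2; infer_instance

-- ===== CLAIM (what is proved, stated in full; the proofs are below) =====
def Claim_equal_getmeanHight2 : Prop := ∀ (l : List Int), Dom_getmeanHight2 l → Pre_getmeanHight2 l → Spec_getmeanHight2 l (getmeanHight2 l)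

-- ===== LEMMAS AND PROOFS =====

-- the window count A accumulates for offset i, as a function of the three exact counts
theorem pv_countP_window (l : List Int) (c : Int) :
    ((l.countP (fun v => |c - v| < 2)) : Int) = l.count (c - 1) + l.count c + l.count (c + 1) := by
  induction l with
  | nil => simp
  | cons v t ih =>
    simp only [List.countP_cons, List.count_cons, beq_iff_eq, decide_eq_true_eq]
    push_cast
    rw [ih]
    have habs : (|c - v| < 2) ↔ (-2 < c - v ∧ c - v < 2) := abs_lt
    simp only [habs]
    split_ifs <;> omega

-- pySetD on a nonnegative in-range index is List.set
theorem pv_pySetD_eq (xs : List Int) (i : Int) (v : Int) (h0 : 0 ≤ i) (h1 : i < xs.length) :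
    PySem.List.pySetD xs i v = xs.set i.toNat v := by
  simp [PySem.List.pySetD, PySem.List.pySet?, PySem.List.pyIdx?, h0, h1]

theorem pv_pyGetD_eq (xs : List Int) (i : Int) (d : Int) (h0 : 0 ≤ i) (h1 : i < xs.length) :
    PySem.List.pyGetD xs i d = xs.getD i.toNat d := by
  have h2 : i.toNat < xs.length := by omega
  simp [PySem.List.pyGetD, PySem.List.pyGet?, PySem.List.pyIdx?, h0, h1, List.getD_eq_getElem?_getD]

-- A's inner loop over l only touches slot i: it adds the window count to it
theorem pv_inner_fold (minv i : Int) (hi : 0 ≤ i) :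
    ∀ (l : List Int) (xx : List Int), i < xx.length →
    l.foldl (fun xx v => if |i + minv - v| < 2 then
        PySem.List.pySetD xx i (PySem.List.pyGetD xx i 0 + 1) else xx) xx
    = xx.set i.toNat (xx.getD i.toNat 0 + (l.countP (fun v => |i + minv - v| < 2) : Int)) := by
  intro l
  induction l with
  | nil =>
    intro xx h
    have hk : i.toNat < xx.length := by omega
    simp [List.getD_eq_getElem?_getD, List.getElem?_eq_getElem hk]
  | cons v t ih =>
    intro xx h
    have hk : i.toNat < xx.length := by omega
    simp only [List.foldl_cons, List.countP_cons]
    by_cases hc : |i + minv - v| < 2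
    · rw [if_pos hc, pv_pySetD_eq _ _ _ hi h, pv_pyGetD_eq _ _ _ hi h]
      rw [ih _ (by simpa using h)]
      rw [List.set_set]
      have hg : (xx.set i.toNat (xx.getD i.toNat 0 + 1)).getD i.toNat 0 = xx.getD i.toNat 0 + 1 := by
        simp [List.getD_eq_getElem?_getD, List.getElem?_eq_getElem hk,
          List.getElem?_set_self' ]
      rw [hg]
      have : (decide (|i + minv - v| < 2)) = true := by simpa using hc
      rw [this]
      simp only [if_true]
      congr 1
      push_cast
      ring
    · rw [if_neg hc, ih _ h]
      have : (decide (|i + minv - v| < 2)) = false := by simpa using hc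
      rw [this]
      simp

-- A's outer loop: after the first k offsets, the table is the window counts followed by zeros
theorem pv_outer_fold (l : List Int) (minv R : Int) (hR : 0 ≤ R) :
    ∀ (k : Nat), (k : Int) ≤ R →
    (PySem.List.pyRange 0 (k : Int)).foldl (fun xx i =>
      l.foldl (fun xx v => if |i + minv - v| < 2 then
          PySem.List.pySetD xx i (PySem.List.pyGetD xx i 0 + 1) else xx) xx)
      ((PySem.List.pyRange 0 (R + 1)).map (fun _ => (0 : Int)))
    = (List.range k).map (fun (j : Nat) => ((l.countP (fun v => |(j : Int) + minv - v| < 2)) : Int))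
      ++ List.replicate (R.toNat + 1 - k) (0 : Int) := by
  have hinit : ((PySem.List.pyRange 0 (R + 1)).map (fun _ => (0 : Int)))
      = List.replicate (R.toNat + 1) (0 : Int) := by
    rw [List.map_const', PySem.List.length_pyRange_one]
    congr 1
    omega
  intro k
  induction k with
  | zero =>
    intro _
    have : PySem.List.pyRange 0 ((0 : Nat) : Int) = [] := by
      apply PySem.List.pyRange_one_eq_nil; simp
    rw [this, hinit]
    simp
  | succ k ih =>
    intro hk
    have hk' : (k : Int) ≤ R := by push_cast at hk ⊢; omega
    have hsplit : PySem.List.pyRange 0 ((k + 1 : Nat) : Int)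
        = PySem.List.pyRange 0 (k : Int) ++ [(k : Int)] := by
      push_cast
      exact PySem.List.pyRange_one_succ_right (by positivity)
    rw [hsplit, List.foldl_append, ih hk']
    rw [List.foldl_cons, List.foldl_nil]
    set A := (List.range k).map (fun (j : Nat) => ((l.countP (fun v => |(j : Int) + minv - v| < 2)) : Int)) with hA
    have hAlen : A.length = k := by simp [hA]
    have hm : 1 ≤ R.toNat + 1 - k := by omega
    have hBlen : (A ++ List.replicate (R.toNat + 1 - k) (0 : Int)).length = R.toNat + 1 := by
      simp [hAlen]; omega
    rw [pv_inner_fold minv (k : Int) (by positivity) l _ (by rw [hBlen]; push_cast; omega)]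
    have htoNat : ((k : Int)).toNat = k := by omega
    rw [htoNat]
    have hgetD : (A ++ List.replicate (R.toNat + 1 - k) (0 : Int)).getD k 0 = 0 := by
      rw [List.getD_append_right _ _ _ _ (by omega)]
      rw [hAlen]
      simp [List.getD_eq_getElem?_getD, show k ≤ R.toNat by omega]
    rw [hgetD]
    rw [List.set_append, if_neg (by omega), hAlen, Nat.sub_self]
    have hrep : (List.replicate (R.toNat + 1 - k) (0 : Int)).set 0
        (0 + ((l.countP (fun v => |(k : Int) + minv - v| < 2)) : Int))
        = (0 + ((l.countP (fun v => |(k : Int) + minv - v| < 2)) : Int)) :: List.replicate (R.toNat + 1 - (k+1)) (0 : Int) := by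
      have : R.toNat + 1 - k = (R.toNat + 1 - (k+1)) + 1 := by omega
      rw [this, List.replicate_succ]
      simp
    rw [hrep]
    simp [List.range_succ, hA]

-- characterisation of A's tail: first index of the maximum of (map f (range n) ++ [0])
theorem pv_A_char (n : Nat) (hn : 0 < n) (f : Nat → Int) (hf0 : 1 ≤ f 0) :
    ∃ M idx, PySem.List.max? ((List.range n).map f ++ [0]) (fun x => x) = some M ∧
      PySem.List.index? ((List.range n).map f ++ [0]) M = some idx ∧
      idx < n ∧ f idx = M ∧ (∀ j, j < n → f j ≤ M) ∧ (∀ j, j < idx → f j < M) ∧ 1 ≤ M := by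
  set xs := (List.range n).map f ++ [0] with hxs
  have hne : xs ≠ [] := by simp [hxs]
  obtain ⟨M, hM⟩ : ∃ M, PySem.List.max? xs (fun x => x) = some M := by
    cases h : PySem.List.max? xs (fun x => x) with
    | none => exact absurd ((PySem.List.max?_eq_none_iff xs (fun x => x)).mp h) hne
    | some m => exact ⟨m, rfl⟩
  have hmax : ∀ y ∈ xs, y ≤ M := fun y hy => PySem.List.max?_isMax hM y hy
  have hmem : M ∈ xs := PySem.List.max?_mem hM
  have hf0mem : f 0 ∈ xs := by
    apply List.mem_append_left
    exact List.mem_map.mpr ⟨0, List.mem_range.mpr hn, rfl⟩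
  have hM1 : 1 ≤ M := le_trans hf0 (hmax _ hf0mem)
  obtain ⟨idx, hidx⟩ : ∃ idx, PySem.List.index? xs M = some idx := by
    have := PySem.List.index?_isSome_iff xs M
    cases h : PySem.List.index? xs M with
    | none => rw [h] at this; simp at this; exact absurd hmem this
    | some k => exact ⟨k, rfl⟩
  obtain ⟨hk, hval, hbefore⟩ := PySem.List.getElem_of_index?_eq_some hidx
  have hlen : xs.length = n + 1 := by simp [hxs]
  have hidxn : idx < n := by
    by_contra hcon
    have hval0 : xs[idx]'hk = 0 := by
      simp only [hxs]
      rw [List.getElem_append_right (by simp; omega)]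
      simp
    rw [hval0] at hval
    omega
  have hgetf : ∀ (j : Nat) (hj : j < n), xs[j]'(by omega) = f j := by
    intro j hj
    simp only [hxs]
    rw [List.getElem_append_left (by simpa using hj)]
    simp
  have hfidx : f idx = M := by rw [← hgetf idx hidxn]; exact hval
  refine ⟨M, idx, hM, hidx, hidxn, hfidx, ?_, ?_, hM1⟩
  · intro j hj
    apply hmax
    exact List.mem_append_left _ (List.mem_map.mpr ⟨j, List.mem_range.mpr hj, rfl⟩)
  · intro j hj
    have hjn : j < n := by omega
    have hne' : f j ≠ M := by
      have := hbefore j hj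
      rw [hgetf j hjn] at this
      exact this
    have hle : f j ≤ M := hmax _ (List.mem_append_left _ (List.mem_map.mpr ⟨j, List.mem_range.mpr hjn, rfl⟩))
    omega

-- characterisation of B's scan: first strict improvement over a strictly increasing list
theorem pv_fold_first_max (f : Int → Int) :
    ∀ (xs : List Int) (b : Int × Int), xs.Pairwise (· < ·) →
    (xs.foldl (fun b i => if b.2 < f i then (i, f i) else b) b = b ∧ ∀ i ∈ xs, f i ≤ b.2) ∨
    ((xs.foldl (fun b i => if b.2 < f i then (i, f i) else b) b).1 ∈ xs ∧
     f (xs.foldl (fun b i => if b.2 < f i then (i, f i) else b) b).1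
       = (xs.foldl (fun b i => if b.2 < f i then (i, f i) else b) b).2 ∧
     b.2 < (xs.foldl (fun b i => if b.2 < f i then (i, f i) else b) b).2 ∧
     (∀ i ∈ xs, f i ≤ (xs.foldl (fun b i => if b.2 < f i then (i, f i) else b) b).2) ∧
     (∀ i ∈ xs, i < (xs.foldl (fun b i => if b.2 < f i then (i, f i) else b) b).1 →
        f i < (xs.foldl (fun b i => if b.2 < f i then (i, f i) else b) b).2)) := by
  intro xs
  induction xs with
  | nil => intro b _; left; simp
  | cons x t ih =>
    intro b hp
    have hpt : t.Pairwise (· < ·) := hp.of_cons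
    have hxt : ∀ i ∈ t, x < i := by
      intro i hi; exact List.rel_of_pairwise_cons hp hi
    simp only [List.foldl_cons]
    by_cases hc : b.2 < f x
    · rw [if_pos hc]
      rcases ih (x, f x) hpt with ⟨heq, hle⟩ | ⟨hmem, hval, hlt, hle, hbef⟩
      · right
        rw [heq]
        refine ⟨List.mem_cons_self, rfl, hc, ?_, ?_⟩
        · intro i hi
          rcases List.mem_cons.mp hi with rfl | hi
          · exact le_refl _
          · exact hle i hi
        · intro i hi hlt'
          rcases List.mem_cons.mp hi with rfl | hi
          · omega
          · exact absurd hlt' (by have := hxt i hi; omega)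
      · right
        refine ⟨List.mem_cons_of_mem _ hmem, hval, by simpa using lt_trans hc hlt, ?_, ?_⟩
        · intro i hi
          rcases List.mem_cons.mp hi with rfl | hi
          · exact le_of_lt (by simpa using hlt)
          · exact hle i hi
        · intro i hi hlt'
          rcases List.mem_cons.mp hi with rfl | hi
          · simpa using hlt
          · exact hbef i hi hlt'
    · rw [if_neg hc]
      rcases ih b hpt with ⟨heq, hle⟩ | ⟨hmem, hval, hlt, hle, hbef⟩
      · left
        refine ⟨heq, ?_⟩
        intro i hi
        rcases List.mem_cons.mp hi with rfl | hi
        · omega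
        · exact hle i hi
      · right
        refine ⟨List.mem_cons_of_mem _ hmem, hval, hlt, ?_, ?_⟩
        · intro i hi
          rcases List.mem_cons.mp hi with rfl | hi
          · omega
          · exact hle i hi
        · intro i hi hlt'
          rcases List.mem_cons.mp hi with rfl | hi
          · omega
          · exact hbef i hi hlt'

-- ===== VERDICT (by name: the statement is the Claim_ definition above) =====
theorem getmeanHight2_spec : Claim_equal_getmeanHight2 := by
  intro l _ hpre
  unfold Spec_getmeanHight2
  obtain ⟨minv, hmin⟩ : ∃ m, PySem.List.min? l (fun x => x) = some m := by
    cases h : PySem.List.min? l (fun x => x) with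
    | none => exact absurd ((PySem.List.min?_eq_none_iff l (fun x => x)).mp h) hpre
    | some m => exact ⟨m, rfl⟩
  obtain ⟨maxv, hmax⟩ : ∃ m, PySem.List.max? l (fun x => x) = some m := by
    cases h : PySem.List.max? l (fun x => x) with
    | none => exact absurd ((PySem.List.max?_eq_none_iff l (fun x => x)).mp h) hpre
    | some m => exact ⟨m, rfl⟩
  have hminmem : minv ∈ l := PySem.List.min?_mem hmin
  have hmaxmem : maxv ∈ l := PySem.List.max?_mem hmax
  have hminle : ∀ y ∈ l, minv ≤ y := PySem.List.min?_isMin hmin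
  have hmaxge : ∀ y ∈ l, y ≤ maxv := PySem.List.max?_isMax hmax
  have hRnn : 0 ≤ maxv - minv := by have := hminle maxv hmaxmem; omega
  simp only [getmeanHight2, getmeanHight2_alt, hmin, hmax]
  by_cases hR0 : maxv - minv = 0
  · rw [hR0]
    have h01 : PySem.List.pyRange (0:Int) (0+1) = [(0:Int)] := by
      simpa using PySem.List.pyRange_one_singleton (0:Int)
    have hnil : PySem.List.pyRange (0:Int) (0:Int) = [] := PySem.List.pyRange_one_eq_nil (le_refl 0)
    rw [h01, hnil]
    simp only [List.foldl_nil, List.map_cons, List.map_nil]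
    have hm0 : PySem.List.max? ([(0:Int)]) (fun x => x) = some 0 := rfl
    have hi0 : PySem.List.index? ([(0:Int)]) (0:Int) = some 0 := rfl
    simp only [hm0, hi0]
    simp
  · -- main branch: at least two distinct slots
    have hnR : ((maxv - minv).toNat : Int) = maxv - minv := by omega
    rw [← hnR]
    set n := (maxv - minv).toNat with hn
    have hnpos : 0 < n := by omega
    rw [if_neg (by exact_mod_cast (by omega : ¬ ((n:Int) = 0)))]
    -- A side: the table is the window counts followed by a zero slot
    have houter := pv_outer_fold l minv ((n : Int)) (by positivity) n (le_refl _)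
    have hrep1 : ((((n:Int))).toNat + 1 - n) = 1 := by omega
    rw [hrep1, List.replicate_one] at houter
    rw [houter]
    set g : Nat → Int := fun (j : Nat) => ((l.countP (fun v => |(j : Int) + minv - v| < 2)) : Int) with hg
    have hg0 : 1 ≤ g 0 := by
      have hpos : 0 < l.countP (fun v => |((0:Nat) : Int) + minv - v| < 2) := by
        rw [List.countP_pos_iff]
        exact ⟨minv, hminmem, by norm_num⟩
      simp only [hg]
      omega
    obtain ⟨M, idx, hM, hidx, hidxn, hfidx, hallle, hbef, hM1⟩ := pv_A_char n hnpos g hg0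
    simp only [hM]
    simp only [hidx]
    -- B side: counter lookups are exact counts
    have hgetD : ∀ w : Int,
        (List.foldl (fun d v => d.insert v (d.getD v 0 + 1)) (PySem.Dict.empty : PySem.Dict Int Int) l).getD w 0
        = (List.count w l : Int) := by
      intro w
      rw [PySem.Dict.getD_foldl_insert_add_one]
      simp
    simp only [hgetD]
    have hkeys2 : (List.foldl (fun d v => d.insert v (d.getD v 0 + 1)) (PySem.Dict.empty : PySem.Dict Int Int) l).keys
        = PySem.Set.ofList l := by
      rw [PySem.Dict.keys_foldl_insert l (fun d x => d.getD x 0 + 1) (PySem.Dict.empty : PySem.Dict Int Int)]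
      rfl
    simp only [hkeys2]
    set S : Int → Int := fun i =>
      ((List.count (minv + i - 1) l : Int) + (List.count (minv + i) l : Int)
        + (List.count (minv + i + 1) l : Int)) with hS
    set cands := PySem.List.sorted
      (PySem.Set.ofList (List.flatMap
        (fun v => List.filter (fun i => decide (0 ≤ i ∧ i < (n:Int))) [v - minv - 1, v - minv, v - minv + 1])
        (PySem.Set.ofList l)))
      (fun x => x) with hcands
    have hpair : cands.Pairwise (· < ·) := by
      rw [hcands]; exact PySem.List.sorted_ofList_pairwise_lt _
    have hmemc : ∀ i : Int, i ∈ cands ↔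
        ∃ v ∈ l, (i = v - minv - 1 ∨ i = v - minv ∨ i = v - minv + 1) ∧ 0 ≤ i ∧ i < (n:Int) := by
      intro i
      rw [hcands, PySem.List.mem_sorted, PySem.Set.mem_ofList, List.mem_flatMap]
      constructor
      · rintro ⟨v, hv, hi⟩
        simp only [List.mem_filter, List.mem_cons, List.not_mem_nil, or_false,
          decide_eq_true_eq] at hi
        exact ⟨v, (PySem.Set.mem_ofList l v).mp hv, hi.1, hi.2⟩
      · rintro ⟨v, hv, h1, h2⟩
        refine ⟨v, (PySem.Set.mem_ofList l v).mpr hv, ?_⟩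
        simp only [List.mem_filter, List.mem_cons, List.not_mem_nil, or_false,
          decide_eq_true_eq]
        exact ⟨h1, h2⟩
    have hSpos : ∀ i ∈ cands, 0 < S i := by
      intro i hi
      obtain ⟨v, hv, htrip, _, _⟩ := (hmemc i).mp hi
      have hvpos : 0 < List.count v l := List.count_pos_iff.mpr hv
      have c1 : (0:Int) ≤ List.count (minv + i - 1) l := by positivity
      have c2 : (0:Int) ≤ List.count (minv + i) l := by positivity
      have c3 : (0:Int) ≤ List.count (minv + i + 1) l := by positivity
      rcases htrip with h | h | h
      · have : minv + i + 1 = v := by omega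
        rw [hS]; simp only []; rw [this]; omega
      · have : minv + i = v := by omega
        rw [hS]; simp only []; rw [this]; omega
      · have : minv + i - 1 = v := by omega
        rw [hS]; simp only []; rw [this]; omega
    have hcomplete : ∀ i : Int, 0 ≤ i → i < (n:Int) → 0 < S i → i ∈ cands := by
      intro i h0 h1 hpos
      rw [hS] at hpos
      simp only [] at hpos
      by_cases ha : 0 < List.count (minv + i - 1) l
      · have hmem := List.count_pos_iff.mp ha
        exact (hmemc i).mpr ⟨minv + i - 1, hmem, by right; right; omega, h0, h1⟩
      · by_cases hb : 0 < List.count (minv + i) l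
        · have hmem := List.count_pos_iff.mp hb
          exact (hmemc i).mpr ⟨minv + i, hmem, by right; left; omega, h0, h1⟩
        · have hc : 0 < List.count (minv + i + 1) l := by
            simp only [Nat.not_lt, Nat.le_zero] at ha hb
            have c1 : ((List.count (minv + i - 1) l : Int)) = 0 := by rw [ha]; rfl
            have c2 : ((List.count (minv + i) l : Int)) = 0 := by rw [hb]; rfl
            have c3 : (0:Int) ≤ List.count (minv + i + 1) l := by positivity
            omega
          have hmem := List.count_pos_iff.mp hc
          exact (hmemc i).mpr ⟨minv + i + 1, hmem, by left; omega, h0, h1⟩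
    -- the window count over the list equals the sum of the three exact counts
    have hgS : ∀ j : Nat, g j = S ((j : Int)) := by
      intro j
      rw [hg]
      simp only []
      rw [pv_countP_window l ((j : Int) + minv)]
      rw [hS]
      simp only []
      have e1 : minv + (j:Int) - 1 = (j:Int) + minv - 1 := by ring
      have e2 : minv + (j:Int) = (j:Int) + minv := by ring
      rw [e1, e2]
    rcases pv_fold_first_max S cands (0,0) hpair with ⟨heq, hall0⟩ | hfold
    · exfalso
      have h0c : (0:Int) ∈ cands := by
        apply hcomplete 0 (le_refl 0) (by exact_mod_cast hnpos)
        have := hgS 0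
        simp only [Nat.cast_zero] at this
        omega
      have := hall0 0 h0c
      have hS0 : 1 ≤ S 0 := by
        have := hgS 0
        simp only [Nat.cast_zero] at this
        omega
      simp only [] at this
      omega
    · simp only [] at hfold
      obtain ⟨hrmem, hrval, hrpos, hrle, hrbef⟩ := hfold
      set r := cands.foldl (fun b i => if b.2 < S i then (i, S i) else b) ((0:Int), (0:Int)) with hr
      obtain ⟨_, _, _, hr0, hrn⟩ := (hmemc r.1).mp hrmem
      set rn := r.1.toNat with hrn'
      have hrcast : ((rn : Nat) : Int) = r.1 := by omega
      have hrnn : rn < n := by omega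
      -- r.2 = M
      have h1 : r.2 ≤ M := by
        have := hallle rn hrnn
        rw [hgS rn, hrcast] at this
        omega
      have hidxc : ((idx : Nat) : Int) ∈ cands := by
        apply hcomplete idx (by positivity) (by exact_mod_cast hidxn)
        have := hgS idx
        omega
      have h2 : M ≤ r.2 := by
        have := hrle _ hidxc
        rw [← hgS idx] at this
        omega
      have hSidx : S ((idx : Nat) : Int) = M := by rw [← hgS idx]; exact hfidx
      have hfinal : ((idx : Nat) : Int) = r.1 := by
        rcases lt_trichotomy ((idx : Nat) : Int) r.1 with h | h | h
        · have := hrbef _ hidxc h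
          omega
        · exact h
        · exfalso
          have hlt : rn < idx := by omega
          have := hbef rn hlt
          rw [hgS rn, hrcast] at this
          omega
      rw [hfinal]
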